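-- pv_equiv track=rewrite | github.com/PrithwishJana/CoTran | transpilers/TSS_CodeConv_PyTranslations/244/GFG.py | areVowelsInOrder
-- ===== SOURCE A (Python) =====
-- def areVowelsInOrder(s):
--     n = len(s)
--     c = chr(64)
--     for i in range(1, n):
--         if s[i] == 'a' or s[i] == 'e' or s[i] == 'i' or s[i] == 'o' or s[i] == 'u':
--             if s[i] < c:
--                 return False
--             else:
--                 c = s[i]
--     return True
-- ===== SOURCE B (Python) =====
-- def areVowelsInOrder(s):
--     vowels = [ch for ch in s[1:] if ch in 'aeiou']
--     return vowels == sorted(vowels)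
-- ===== Notes on version B (the rewrite author's own statement) =====
-- stated objective: idiomatic
-- what changed: Replaced the running-max index loop with early return by building the filtered vowel list of s[1:] once (comprehension) and comparing it to its sorted order.
import Mathlib
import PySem

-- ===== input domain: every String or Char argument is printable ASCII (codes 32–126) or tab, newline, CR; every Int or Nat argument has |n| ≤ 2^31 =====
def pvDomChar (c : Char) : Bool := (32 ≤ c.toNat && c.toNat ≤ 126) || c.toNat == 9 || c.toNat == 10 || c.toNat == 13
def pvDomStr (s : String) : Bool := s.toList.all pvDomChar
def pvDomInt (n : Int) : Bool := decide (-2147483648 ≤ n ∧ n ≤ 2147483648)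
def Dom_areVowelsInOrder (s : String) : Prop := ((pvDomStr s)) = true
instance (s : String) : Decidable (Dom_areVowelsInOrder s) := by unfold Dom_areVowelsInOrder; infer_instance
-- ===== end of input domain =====

-- B builds the filtered vowel list of s[1:] once and compares it to its sorted order, replacing
-- A's running-max index loop with early return (objective: idiomatic; return value only).

-- ===== PORT A =====
-- the loop 'for i in range(1, n): …' with early return, state c
def pvALoop (cs : List Char) : List Int → Char → Bool
  | [], _ => true
  | i :: rest, c =>
    match PySem.List.pyGet? cs i with
    | none => true   -- unreachable: i drawn from range(1, len(cs))
    | some ch =>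
      if ch = 'a' ∨ ch = 'e' ∨ ch = 'i' ∨ ch = 'o' ∨ ch = 'u' then
        if ch < c then false else pvALoop cs rest ch
      else pvALoop cs rest c

def areVowelsInOrder (s : String) : Bool :=
  let cs := s.toList
  let n : Int := cs.length
  pvALoop cs (PySem.List.pyRange 1 n 1) (Char.ofNat 64)

-- ===== PORT B =====
-- 'ch in "aeiou"'
def pvIsV (ch : Char) : Bool := ("aeiou".toList).contains ch

def areVowelsInOrder_alt (s : String) : Bool :=
  let vowels := (PySem.List.slice s.toList (some 1) none).filter pvIsV
  vowels = PySem.List.sorted vowels (fun x => x) false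

-- ===== PRECONDITION & SPEC =====
def Spec_areVowelsInOrder (s : String) (out : Bool) : Prop := out = areVowelsInOrder_alt s
instance (s : String) (out : Bool) : Decidable (Spec_areVowelsInOrder s out) := by unfold Spec_areVowelsInOrder; infer_instance

-- ===== CLAIM (what is proved, stated in full; the proofs are below) =====
def Claim_equal_areVowelsInOrder : Prop := ∀ (s : String), Dom_areVowelsInOrder s → Spec_areVowelsInOrder s (areVowelsInOrder s)

-- ===== LEMMAS AND PROOFS =====

-- A's loop restated as structural recursion on the character tail
def pvChainB : List Char → Char → Bool
  | [], _ => true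
  | ch :: rest, c =>
    if ch = 'a' ∨ ch = 'e' ∨ ch = 'i' ∨ ch = 'o' ∨ ch = 'u' then
      if ch < c then false else pvChainB rest ch
    else pvChainB rest c

lemma pvALoop_eq_chainB (cs : List Char) :
    ∀ (k i : Nat) (c : Char), cs.length - i ≤ k →
      pvALoop cs (PySem.List.pyRange (i : Int) (cs.length : Int) 1) c = pvChainB (cs.drop i) c := by
  intro k
  induction k with
  | zero =>
    intro i c h
    have hle : cs.length ≤ i := by omega
    rw [PySem.List.pyRange_one_eq_nil (by exact_mod_cast hle)]
    rw [List.drop_eq_nil_of_le hle]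
    rfl
  | succ k ih =>
    intro i c h
    by_cases hi : i < cs.length
    · rw [PySem.List.pyRange_one_cons (by exact_mod_cast hi)]
      have hget : PySem.List.pyGet? cs (i : Int) = some cs[i] := by
        simp [PySem.List.pyGet?_natCast, List.getElem?_eq_getElem hi]
      have hdrop : cs.drop i = cs[i] :: cs.drop (i + 1) :=
        List.drop_eq_getElem_cons hi
      have hcast : ((i : Int) + 1) = ((i + 1 : Nat) : Int) := by push_cast; ring
      rw [hdrop]
      simp only [pvALoop, hget, pvChainB, hcast]
      split_ifs
      all_goals first
        | rfl
        | exact ih (i + 1) cs[i] (by omega)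
        | exact ih (i + 1) c (by omega)
    · have hle : cs.length ≤ i := by omega
      rw [PySem.List.pyRange_one_eq_nil (by exact_mod_cast hle)]
      rw [List.drop_eq_nil_of_le hle]
      rfl

lemma pvIsV_iff (ch : Char) :
    pvIsV ch = true ↔ (ch = 'a' ∨ ch = 'e' ∨ ch = 'i' ∨ ch = 'o' ∨ ch = 'u') := by
  simp [pvIsV]

lemma pvChainB_iff (l : List Char) : ∀ c,
    pvChainB l c = true ↔ List.IsChain (· ≤ ·) (c :: l.filter pvIsV) := by
  induction l with
  | nil => intro c; simp [pvChainB]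
  | cons ch rest ih =>
    intro c
    by_cases hv : ch = 'a' ∨ ch = 'e' ∨ ch = 'i' ∨ ch = 'o' ∨ ch = 'u'
    · have hb : pvIsV ch = true := (pvIsV_iff ch).2 hv
      simp only [pvChainB, if_pos hv, List.filter_cons, hb, if_pos]
      by_cases hlt : ch < c
      · simp only [if_pos hlt, List.isChain_cons_cons]
        constructor
        · intro h; exact absurd h (by simp)
        · intro h; exact absurd h.1 (not_le.mpr hlt)
      · simp only [if_neg hlt, List.isChain_cons_cons, ih ch]
        constructor
        · intro h; exact ⟨le_of_not_gt hlt, h⟩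
        · intro h; exact h.2
    · have hb : pvIsV ch = false := by
        rcases Bool.eq_false_or_eq_true (pvIsV ch) with h | h
        · exact absurd ((pvIsV_iff ch).1 h) hv
        · exact h
      simp only [pvChainB, if_neg hv, List.filter_cons, hb]
      simpa using ih c

lemma pvVowel_at_least_a {ch : Char} (h : pvIsV ch = true) : Char.ofNat 64 ≤ ch := by
  rcases (pvIsV_iff ch).1 h with rfl | rfl | rfl | rfl | rfl <;> decide

lemma pvSorted_self_iff (v : List Char) :
    (decide (v = PySem.List.sorted v (fun x => x) false) = true) ↔
      List.Pairwise (· ≤ ·) v := by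
  constructor
  · intro h
    have hv : v = PySem.List.sorted v (fun x => x) false := by simpa using h
    rw [hv]
    simpa using PySem.List.sorted_pairwise v (fun x => x)
  · intro h
    have hv := PySem.List.sorted_eq_self_of_pairwise v (fun x => x) (by simpa using h)
    exact decide_eq_true hv.symm

lemma pvAlt_iff (s : String) :
    areVowelsInOrder_alt s = true ↔
      List.Pairwise (· ≤ ·) ((s.toList.drop 1).filter pvIsV) := by
  unfold areVowelsInOrder_alt
  rw [PySem.List.slice_from_one, ← List.drop_one]
  exact pvSorted_self_iff _

-- ===== VERDICT (by name: the statement is the Claim_ definition above) =====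
theorem areVowelsInOrder_spec : Claim_equal_areVowelsInOrder := by
  intro s _
  unfold Spec_areVowelsInOrder
  have hA : areVowelsInOrder s = pvChainB (s.toList.drop 1) (Char.ofNat 64) := by
    unfold areVowelsInOrder
    exact pvALoop_eq_chainB s.toList s.toList.length 1 (Char.ofNat 64) (by omega)
  rw [Bool.eq_iff_iff, hA, pvChainB_iff, pvAlt_iff]
  rw [List.isChain_iff_pairwise]
  constructor
  · intro h; exact (List.pairwise_cons.mp h).2
  · intro h
    refine List.pairwise_cons.mpr ⟨?_, h⟩
    intro x hx
    exact pvVowel_at_least_a (List.of_mem_filter hx)
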